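-- pv_equiv track=rewrite | github.com/ZckFreedom/Mathworks | db_sqence/new_way_PCCR.py | shift_order_for_1
-- ===== SOURCE A (Python) =====
-- def find_nk(s_sequence):
-- 	size = len(s_sequence)
-- 	state = s_sequence[:size - 1]
-- 	state += state
-- 	states = []
--
-- 	for i in range(0, size - 1):
-- 		if state[i: i + size] not in states:
-- 			states.append(state[i: i + size])
--
-- 	states.sort()
-- 	return states[0]
--
-- class Shift_order_space:
-- 	def __init__(self):
-- 		self._shiftlist = []
-- 		self._shiftnumber = 0
--
-- 	def get_number(self):
-- 		return self._shiftlist[-1][1]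
--
-- 	def len(self):
-- 		return len(self._shiftlist)
--
-- 	def append(self, a_list):
-- 		self._shiftlist.append((a_list, self._shiftnumber))
-- 		self._shiftnumber += 1
--
-- 	def if_not_in(self, a_list):
-- 		if len(self._shiftlist) == 0:
-- 			return True
-- 		for i in range(0, len(self._shiftlist)):
-- 			if self._shiftlist[i][0] == a_list:
-- 				return False
-- 		return True
--
-- 	def find_sequence(self, a_list):
-- 		for i in range(0, len(self._shiftlist)):
-- 			if a_list == self._shiftlist[i][0]:
-- 				return self._shiftlist[i][1]
--
-- 	def select_sort(self):
-- 		resort = self._shiftlist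
-- 		for i in range(0, len(resort) - 1):
-- 			m = i
-- 			for j in range(i, len(resort)):
-- 				if resort[m][0] < resort[j][0]:
-- 					m = j
-- 			if i != m:
-- 				resort[i], resort[m] = resort[m], resort[i]
--
-- def shift_order_for_1(s_sequence):
-- 	size = len(s_sequence) - 1
-- 	necklace = find_nk(s_sequence)
-- 	necklace = necklace[:size]
-- 	necklace += necklace
--
-- 	states = Shift_order_space()
-- 	for i in range(size - 1, -1, -1):
-- 		if states.if_not_in(necklace[i:i + size + 1]) and necklace[i] == 1:
-- 			states.append(necklace[i:i + size + 1])
--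
-- 	return states.find_sequence(s_sequence), states.len()
-- ===== SOURCE B (Python) =====
-- def least_rotation(core):
--     # column-wise candidate elimination: keep the starts whose rotation has the
--     # minimal prefix, one character column at a time
--     doubled2 = core + core
--     cands = list(range(len(core)))
--     for t in range(len(core)):
--         m = min(doubled2[i + t] for i in cands)
--         cands = [i for i in cands if doubled2[i + t] == m]
--     return doubled2[cands[0]:cands[0] + len(core)]
--
-- def shift_order_for_1(s_sequence):
--     size = len(s_sequence) - 1
--     neck = least_rotation(s_sequence[:size])
--     dn = neck + neck
--     # a start i represents its window iff no later start has the same window; the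
--     # rank of a window is the number of representatives greater than its own
--     reps = [i for i in range(size)
--             if dn[i] == 1 and all(dn[j:j + size + 1] != dn[i:i + size + 1]
--                                   for j in range(i + 1, size))]
--     idx = None
--     for r in reps:
--         if dn[r:r + size + 1] == s_sequence:
--             idx = sum(1 for i in reps if i > r)
--             break
--     return idx, len(reps)
-- ===== Notes on version B (the rewrite author's own statement) =====
-- stated objective: faster
-- what changed: find_nk's generate-all-rotations/dedup-by-membership/sort pipeline is replaced by column-wise candidate elimination (keep the starts whose rotation has the minimal prefix, one character column at a time), and the stateful backward dedup scan with an incremental counter is replaced by a stateless closed-form characterization: a start is a representative iff no later start has the same window, and a window's number is the count of representatives greater than its own.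
import Mathlib
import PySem

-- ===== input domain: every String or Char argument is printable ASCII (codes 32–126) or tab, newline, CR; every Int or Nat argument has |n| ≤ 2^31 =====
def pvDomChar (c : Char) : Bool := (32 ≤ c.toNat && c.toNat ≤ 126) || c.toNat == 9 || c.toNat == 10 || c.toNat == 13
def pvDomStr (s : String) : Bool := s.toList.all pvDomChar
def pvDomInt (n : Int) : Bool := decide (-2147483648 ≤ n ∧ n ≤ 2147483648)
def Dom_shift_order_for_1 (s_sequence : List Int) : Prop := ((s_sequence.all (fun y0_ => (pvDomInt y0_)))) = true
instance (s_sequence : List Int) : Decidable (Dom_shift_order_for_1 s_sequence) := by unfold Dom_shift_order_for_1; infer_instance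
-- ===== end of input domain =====

-- B replaces find_nk's generate-all/dedup/sort pipeline by column-wise candidate elimination and the
-- stateful backward dedup scan by a stateless representative characterization; measured faster.


-- ===== PORT A =====
def find_nk (s_sequence : List Int) : List Int :=
  let size : Int := (s_sequence.length : Int)
  let state := PySem.List.slice s_sequence none (some (size - 1))
  let state := state ++ state
  let states := (PySem.List.pyRange 0 (size - 1) 1).foldl
    (fun sts i =>
      let w := PySem.List.slice state (some i) (some (i + size))
      if sts.contains w then sts else sts ++ [w]) []
  let states := PySem.List.sorted states (fun x => x) false
  PySem.List.pyGetD states 0 []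

def sos_if_not_in : List (List Int × Int) → List Int → Bool
  | [], _ => true
  | p :: rest, w => if p.1 == w then false else sos_if_not_in rest w

def sos_find_sequence : List (List Int × Int) → List Int → Option Int
  | [], _ => none
  | p :: rest, w => if w == p.1 then some p.2 else sos_find_sequence rest w

def shift_order_for_1 (s_sequence : List Int) : Option Int × Int :=
  let size : Int := (s_sequence.length : Int) - 1
  let necklace := find_nk s_sequence
  let necklace := PySem.List.slice necklace none (some size)
  let necklace := necklace ++ necklace
  let st := (PySem.List.pyRange (size - 1) (-1) (-1)).foldl
    (fun (st : List (List Int × Int) × Int) i =>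
      let w := PySem.List.slice necklace (some i) (some (i + size + 1))
      if sos_if_not_in st.1 w && (PySem.List.pyGetD necklace i 0 == 1) then
        (st.1 ++ [(w, st.2)], st.2 + 1)
      else st) ([], 0)
  (sos_find_sequence st.1 s_sequence, (st.1.length : Int))

-- ===== PORT B =====
def alt_least_rotation (core : List Int) : List Int :=
  let doubled2 := core ++ core
  -- cands[0] is written with a default (pyGetD); on Pre_ the candidate list is never empty
  let cands := (PySem.List.pyRange 0 (core.length : Int) 1).foldl
    (fun cands t =>
      let m := (PySem.List.min? (cands.map (fun i => PySem.List.pyGetD doubled2 (i + t) 0))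
        (fun x => x)).getD 0
      cands.filter (fun i => PySem.List.pyGetD doubled2 (i + t) 0 == m))
    (PySem.List.pyRange 0 (core.length : Int) 1)
  PySem.List.slice doubled2 (some (PySem.List.pyGetD cands 0 0))
    (some (PySem.List.pyGetD cands 0 0 + (core.length : Int)))

-- 'for r in reps: if dn[r:r+size+1] == s_sequence: … break' — first match, as a recursive helper
def alt_first_match (dn s : List Int) (size : Int) : List Int → Option Int
  | [] => none
  | r :: t =>
      if PySem.List.slice dn (some r) (some (r + size + 1)) == s then some r
      else alt_first_match dn s size t

def shift_order_for_1_alt (s_sequence : List Int) : Option Int × Int :=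
  let size : Int := (s_sequence.length : Int) - 1
  let neck := alt_least_rotation (PySem.List.slice s_sequence none (some size))
  let dn := neck ++ neck
  let reps := (PySem.List.pyRange 0 size 1).filter
    (fun i => (PySem.List.pyGetD dn i 0 == 1) &&
      (PySem.List.pyRange (i + 1) size 1).all
        (fun j => !(PySem.List.slice dn (some j) (some (j + size + 1)) ==
                    PySem.List.slice dn (some i) (some (i + size + 1)))))
  let idx := match alt_first_match dn s_sequence size reps with
    | none => none
    | some r => some ((reps.countP (fun i => r < i) : Int))
  (idx, (reps.length : Int))

-- ===== PRECONDITION & SPEC =====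
-- Pre_ excludes lists of length < 2, on which Python A raises IndexError (states[0] of an empty list).
def Pre_shift_order_for_1 (s_sequence : List Int) : Prop := 2 ≤ s_sequence.length
instance (s_sequence : List Int) : Decidable (Pre_shift_order_for_1 s_sequence) := by
  unfold Pre_shift_order_for_1; infer_instance
def pvWitness_shift_order_for_1 : List Int := [1, 0, 1]

def Spec_shift_order_for_1 (s_sequence : List Int) (out : Option Int × Int) : Prop := out = shift_order_for_1_alt s_sequence
instance (s_sequence : List Int) (out : Option Int × Int) : Decidable (Spec_shift_order_for_1 s_sequence out) := by unfold Spec_shift_order_for_1; infer_instance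

-- ===== CLAIM (what is proved, stated in full; the proofs are below) =====
def Claim_equal_shift_order_for_1 : Prop := ∀ (s_sequence : List Int), Dom_shift_order_for_1 s_sequence → Pre_shift_order_for_1 s_sequence → Spec_shift_order_for_1 s_sequence (shift_order_for_1 s_sequence)

-- ===== LEMMAS AND PROOFS =====

-- appending one element to equal-length lists preserves strict lexicographic order
lemma lt_append_singleton : ∀ (a b : List Int), a.length = b.length → a < b →
    ∀ (x y : Int), a ++ [x] < b ++ [y] := by
  intro a b hlen hlt x y
  apply List.lex_lt.mp
  have h := List.lex_lt.mpr hlt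
  clear hlt
  induction h with
  | nil => simp at hlen
  | @rel a' l b' l' hab => exact List.Lex.rel hab
  | @cons a' l l' h ih =>
      exact List.Lex.cons (ih (by simpa using hlen))

-- the window at k of the doubled core is the rotation at k followed by its first character
lemma window_eq_rot (c : List Int) (k : Nat) (hk : k < c.length) :
    ((c ++ c).drop k).take (c.length + 1) = (c.drop k ++ c.take k) ++ [c.getD k 0] := by
  rw [List.drop_append_of_le_length (le_of_lt hk)]
  have h1 : (c.drop k).length = c.length - k := by simp
  rw [List.take_append]
  have h2 : c.length + 1 - (c.drop k).length = k + 1 := by omega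
  rw [List.take_of_length_le (by omega), h2, List.append_assoc]
  congr 1
  rw [List.take_add_one]
  congr 1
  simp [List.getElem?_eq_getElem hk, List.getD]

lemma length_rot (c : List Int) (k : Nat) (hk : k ≤ c.length) :
    (c.drop k ++ c.take k).length = c.length := by simp; omega

-- dedup-by-scan fold is Set.ofList
lemma states_eq_ofList (f : Int → List Int) (r : List Int) :
    r.foldl (fun sts i => if sts.contains (f i) then sts else sts ++ [f i]) []
      = PySem.Set.ofList (r.map f) := by
  rw [PySem.Set.ofList_eq_foldl, List.foldl_map]
  rfl

-- A's find_nk, truncated to the core length, is the least rotation of the core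
lemma necklace_eq (s : List Int) (hs : 2 ≤ s.length) :
    PySem.List.slice (find_nk s) none (some ((s.length : Int) - 1)) =
    (PySem.List.min? ((List.range (s.length - 1)).map
      (fun k => (s.take (s.length - 1)).drop k ++ (s.take (s.length - 1)).take k))
      (fun x => x)).getD [] := by
  set m := s.length - 1 with hm
  have hm1 : 1 ≤ m := by omega
  have hcast : (s.length : Int) - 1 = (m : Int) := by omega
  set c : List Int := s.take m with hcdef
  have hc : c.length = m := by simp [hcdef]; omega
  have hrange : PySem.List.pyRange 0 ((s.length : Int) - 1) 1
      = List.map (fun (k : Nat) => (k : Int)) (List.range m) := by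
    rw [hcast, PySem.List.pyRange_one]
    have h0 : ((m : Int) - 0).toNat = m := by omega
    rw [h0]
    exact List.map_congr_left (fun k _ => by omega)
  -- normalize A's window list
  have hW : (PySem.List.pyRange 0 ((s.length : Int) - 1) 1).map
      (fun i => PySem.List.slice (PySem.List.slice s none (some ((s.length : Int) - 1)) ++
        PySem.List.slice s none (some ((s.length : Int) - 1))) (some i) (some (i + (s.length : Int))))
      = List.map (fun (k : Nat) => (c.drop k ++ c.take k) ++ [c.getD k 0]) (List.range m) := by
    rw [hrange, List.map_map]
    refine List.map_congr_left ?_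
    intro k hk
    rw [List.mem_range] at hk
    have hlen : (s.length : Int) = ((m + 1 : Nat) : Int) := by omega
    simp only [Function.comp_apply, hcast, PySem.List.slice_to_natCast, ← hcdef]
    rw [hlen, PySem.List.slice_natCast_add]
    rw [← hc] at hk ⊢
    exact window_eq_rot c k hk
  -- A's find_nk in closed form
  have hfold := states_eq_ofList
    (fun i => PySem.List.slice (PySem.List.slice s none (some ((s.length : Int) - 1)) ++
      PySem.List.slice s none (some ((s.length : Int) - 1))) (some i) (some (i + (s.length : Int))))
    (PySem.List.pyRange 0 ((s.length : Int) - 1) 1)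
  have hfind : find_nk s = PySem.List.pyGetD (PySem.List.sorted
      (PySem.Set.ofList (List.map (fun (k : Nat) => (c.drop k ++ c.take k) ++ [c.getD k 0]) (List.range m)))
      (fun x => x) false) 0 [] := by
    unfold find_nk
    simp only [] at hfold ⊢
    rw [hfold, hW]
  set W := List.map (fun (k : Nat) => (c.drop k ++ c.take k) ++ [c.getD k 0]) (List.range m) with hWdef
  set R := List.map (fun (k : Nat) => c.drop k ++ c.take k) (List.range m) with hRdef
  -- A's sorted window list is nonempty
  have hw0 : (c.drop 0 ++ c.take 0) ++ [c.getD 0 0] ∈ W := by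
    rw [hWdef]
    exact List.mem_map_of_mem (List.mem_range.mpr (by omega))
  have hne : PySem.List.sorted (PySem.Set.ofList W) (fun x => x) false ≠ [] := by
    intro h
    rw [PySem.List.sorted_eq_nil_iff] at h
    have := (PySem.Set.mem_ofList W _).mpr hw0
    rw [h] at this
    exact List.not_mem_nil this
  obtain ⟨m0, t, hsorted⟩ := List.exists_cons_of_ne_nil hne
  have hDeq : (LinearOrder.toDecidableLT : DecidableLT (List ℤ)) = (fun a b => a.decidableLT b) :=
    funext fun a => funext fun b => Subsingleton.elim _ _
  have hsorted2 : @PySem.List.sorted (List ℤ) (List ℤ) List.instLinearOrder.toLT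
      LinearOrder.toDecidableLT (PySem.Set.ofList W) (fun x => x) false = m0 :: t := by
    rw [hDeq]; exact hsorted
  have hm0mem : m0 ∈ W := by
    have : m0 ∈ PySem.List.sorted (PySem.Set.ofList W) (fun x => x) false := by
      rw [hsorted]; exact List.mem_cons_self
    rw [PySem.List.mem_sorted] at this
    exact (PySem.Set.mem_ofList W m0).mp this
  have hm0min := fun y (hy : y ∈ W) =>
    PySem.List.key_head_sorted_le (PySem.Set.ofList W) (fun x => x) hsorted2 y
      ((PySem.Set.mem_ofList W y).mpr hy)
  -- B's minimum exists
  have hRne : R ≠ [] := by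
    rw [hRdef]
    simp only [ne_eq, List.map_eq_nil_iff, List.range_eq_nil]
    omega
  obtain ⟨r, hr⟩ : ∃ r, PySem.List.min? R (fun x => x) = some r := by
    cases h : PySem.List.min? R (fun x => x) with
    | none => exact absurd ((PySem.List.min?_eq_none_iff R _).mp h) hRne
    | some r => exact ⟨r, rfl⟩
  have hrmem : r ∈ R := PySem.List.min?_mem hr
  have hr2 : @PySem.List.min? (List ℤ) (List ℤ) List.instLinearOrder.toLT
      LinearOrder.toDecidableLT R (fun x => x) = some r := by
    rw [hDeq]; exact hr
  have hrmin := fun z (hz : z ∈ R) => PySem.List.min?_isMin hr2 z hz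
  -- identify the two answers
  obtain ⟨j, hj, hjm0⟩ : ∃ j, j ∈ List.range m ∧ (c.drop j ++ c.take j) ++ [c.getD j 0] = m0 := by
    rw [hWdef] at hm0mem
    exact List.mem_map.mp hm0mem
  obtain ⟨i0, hi0, hi0r⟩ : ∃ i0, i0 ∈ List.range m ∧ c.drop i0 ++ c.take i0 = r := by
    rw [hRdef] at hrmem
    exact List.mem_map.mp hrmem
  rw [List.mem_range] at hj hi0
  have hreq : r = c.drop j ++ c.take j := by
    by_contra hneq
    have h1 := hrmin (c.drop j ++ c.take j)
      (by rw [hRdef]; exact List.mem_map_of_mem (List.mem_range.mpr hj))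
    have hlt := lt_of_le_of_ne h1 hneq
    have h2 := hm0min ((c.drop i0 ++ c.take i0) ++ [c.getD i0 0])
      (by rw [hWdef]; exact List.mem_map_of_mem (List.mem_range.mpr hi0))
    rw [hi0r] at h2
    have h3 : r ++ [c.getD i0 0] < (c.drop j ++ c.take j) ++ [c.getD j 0] := by
      apply lt_append_singleton
      · rw [← hi0r, length_rot c i0 (by omega), length_rot c j (by omega)]
      · exact hlt
    rw [hjm0] at h3
    exact absurd (lt_of_le_of_lt h2 (by exact h3)) (lt_irrefl _)
  have hm0r : m0 = r ++ [c.getD j 0] := by rw [hreq, ← hjm0]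
  have hrlen : r.length = m := by
    rw [← hi0r, length_rot c i0 (by omega)]; exact hc
  rw [hfind, hsorted, PySem.List.pyGetD_zero_cons, hr, hcast,
    PySem.List.slice_to_natCast, hm0r, Option.getD_some, ← hrlen, List.take_left]


-- ---------- phase 1: the column-elimination loop computes the least rotation ----------

def rotc (c : List Int) (k : Nat) : List Int := c.drop k ++ c.take k

def minPref (c : List Int) (T k : Nat) : Bool :=
  decide (∀ j, j < c.length → (rotc c k).take T ≤ (rotc c j).take T)

lemma length_rotc (c : List Int) (k : Nat) (hk : k ≤ c.length) :
    (rotc c k).length = c.length := length_rot c k hk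

lemma rot_window (c : List Int) (k : Nat) (hk : k < c.length) :
    ((c ++ c).drop k).take c.length = rotc c k := by
  rw [rotc, List.drop_append_of_le_length (le_of_lt hk), List.take_append]
  have h1 : (c.drop k).length = c.length - k := by simp
  rw [List.take_of_length_le (by omega), h1]
  have h2 : c.length - (c.length - k) = k := by omega
  rw [h2]

lemma d2_char (c : List Int) (k T : Nat) (hk : k < c.length) (hT : T < c.length) :
    (c ++ c).getD (k + T) 0 = (rotc c k).getD T 0 := by
  rw [List.getD_eq_getElem?_getD, List.getD_eq_getElem?_getD, ← rot_window c k hk,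
    List.getElem?_take, if_pos hT, List.getElem?_drop]

lemma take_succ_getD (l : List Int) (T : Nat) (hT : T < l.length) :
    l.take (T + 1) = l.take T ++ [l.getD T 0] := by
  rw [List.take_add_one]
  congr 1
  simp [List.getElem?_eq_getElem hT, List.getD]

lemma lt_append_singleton_iff (a : List Int) : ∀ (b : List Int), a.length = b.length →
    ∀ (x y : Int), (a ++ [x] < b ++ [y] ↔ (a < b ∨ (a = b ∧ x < y))) := by
  induction a with
  | nil =>
      intro b h x y
      cases b with
      | nil => simp [List.cons_lt_cons_iff]
      | cons b0 bt => simp at h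
  | cons a0 at_ ih =>
      intro b h x y
      cases b with
      | nil => simp at h
      | cons b0 bt =>
          simp only [List.cons_append, List.cons_lt_cons_iff, List.cons.injEq]
          rw [ih bt (by simpa using h)]
          tauto

lemma le_append_singleton_iff (a b : List Int) (h : a.length = b.length) (x y : Int) :
    a ++ [x] ≤ b ++ [y] ↔ (a < b ∨ (a = b ∧ x ≤ y)) := by
  rw [le_iff_lt_or_eq, lt_append_singleton_iff a b h]
  constructor
  · rintro ((h1 | ⟨h1, h2⟩) | heq)
    · exact Or.inl h1
    · exact Or.inr ⟨h1, le_of_lt h2⟩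
    · have := List.append_inj heq h
      refine Or.inr ⟨this.1, le_of_eq ?_⟩
      simpa using this.2
  · rintro (h1 | ⟨h1, h2⟩)
    · exact Or.inl (Or.inl h1)
    · rcases lt_or_eq_of_le h2 with h3 | h3
      · exact Or.inl (Or.inr ⟨h1, h3⟩)
      · exact Or.inr (by rw [h1, h3])


-- PySem.List.min?_isMin with whatever DecidableLT instance elaboration picked
lemma min?_isMin' {α κ : Type} [LinearOrder κ] {i2 : DecidableLT κ} {xs : List α}
    {key : α → κ} {m : α} (h : @PySem.List.min? α κ _ i2 xs key = some m) :
    ∀ y ∈ xs, key m ≤ key y := by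
  have hi : i2 = LinearOrder.toDecidableLT := Subsingleton.elim _ _
  subst hi
  exact PySem.List.min?_isMin h

lemma minPref_exists (c : List Int) (hne : c ≠ []) (T : Nat) :
    ∃ k, k < c.length ∧ minPref c T k = true := by
  obtain ⟨p, hp⟩ : ∃ p, PySem.List.min?
      ((List.range c.length).map (fun k => (rotc c k).take T)) (fun x => x) = some p := by
    cases h : PySem.List.min? ((List.range c.length).map (fun k => (rotc c k).take T))
        (fun x => x) with
    | none =>
        rw [PySem.List.min?_eq_none_iff] at h
        simp only [List.map_eq_nil_iff, List.range_eq_nil, List.length_eq_zero_iff] at h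
        exact absurd h hne
    | some p => exact ⟨p, rfl⟩
  obtain ⟨k, hk, hkp⟩ := List.mem_map.mp (PySem.List.min?_mem hp)
  rw [List.mem_range] at hk
  refine ⟨k, hk, ?_⟩
  rw [minPref, decide_eq_true_eq]
  intro j hj
  rw [hkp]
  exact min?_isMin' hp _ (List.mem_map_of_mem (List.mem_range.mpr hj))

lemma minPref_succ_iff (c : List Int) (T : Nat) (hT : T < c.length) (m' : Int)
    (hmem : ∃ k0, k0 < c.length ∧ minPref c T k0 = true ∧ (rotc c k0).getD T 0 = m')
    (hmin : ∀ k, k < c.length → minPref c T k = true → m' ≤ (rotc c k).getD T 0)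
    (k : Nat) (hk : k < c.length) :
    minPref c (T + 1) k = (minPref c T k && ((rotc c k).getD T 0 == m')) := by
  obtain ⟨k0, hk0, hk0P, hk0c⟩ := hmem
  have hPdef : ∀ S j, minPref c S j = true ↔
      (∀ j', j' < c.length → (rotc c j).take S ≤ (rotc c j').take S) := by
    intro S j
    rw [minPref, decide_eq_true_eq]
  have hlen : ∀ j, j < c.length → (rotc c j).length = c.length :=
    fun j hj => length_rotc c j (le_of_lt hj)
  have htake : ∀ j, j < c.length →
      (rotc c j).take (T + 1) = (rotc c j).take T ++ [(rotc c j).getD T 0] :=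
    fun j hj => take_succ_getD _ _ (by rw [hlen j hj]; omega)
  have htlen : ∀ j j', j < c.length → j' < c.length →
      ((rotc c j).take T).length = ((rotc c j').take T).length := by
    intro j j' hj hj'
    rw [List.length_take, List.length_take, hlen j hj, hlen j' hj']
  by_cases hPT : minPref c T k = true
  · by_cases hchr : (rotc c k).getD T 0 = m'
    · have hgoal : minPref c (T + 1) k = true := by
        rw [hPdef]
        intro j hj
        rw [htake k hk, htake j hj]
        rcases lt_or_eq_of_le ((hPdef T k).mp hPT j hj) with hlt | heq
        · rw [le_append_singleton_iff _ _ (htlen k j hk hj)]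
          exact Or.inl hlt
        · have hjP : minPref c T j = true := by
            rw [hPdef]
            intro j' hj'
            rw [← heq]
            exact (hPdef T k).mp hPT j' hj'
          rw [le_append_singleton_iff _ _ (htlen k j hk hj)]
          exact Or.inr ⟨heq, by rw [hchr]; exact hmin j hj hjP⟩
      rw [hgoal, hPT, hchr]
      simp
    · have hgoal : minPref c (T + 1) k = false := by
        rw [Bool.eq_false_iff]
        intro habs
        apply hchr
        have h1 := (hPdef (T + 1) k).mp habs k0 hk0
        rw [htake k hk, htake k0 hk0,
          le_append_singleton_iff _ _ (htlen k k0 hk hk0)] at h1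
        have hpe : (rotc c k).take T = (rotc c k0).take T :=
          le_antisymm ((hPdef T k).mp hPT k0 hk0) ((hPdef T k0).mp hk0P k hk)
        rcases h1 with h1 | ⟨_, h1⟩
        · rw [hpe] at h1; exact absurd h1 (lt_irrefl _)
        · rw [← hk0c]
          exact le_antisymm h1 (by rw [hk0c]; exact hmin k hk hPT)
      rw [hgoal, hPT, Bool.true_and]
      exact (beq_eq_false_iff_ne.mpr hchr).symm
  · have hgoal : minPref c (T + 1) k = false := by
      rw [Bool.eq_false_iff]
      intro habs
      apply hPT
      rw [hPdef]
      intro j hj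
      have h1 := (hPdef (T + 1) k).mp habs j hj
      rw [htake k hk, htake j hj,
        le_append_singleton_iff _ _ (htlen k j hk hj)] at h1
      rcases h1 with h1 | ⟨h1, _⟩
      · exact le_of_lt h1
      · exact le_of_eq h1
    rw [hgoal, Bool.eq_false_iff.mpr hPT]
    simp

lemma elim_fold (c : List Int) (hne : c ≠ []) : ∀ (T : Nat), T ≤ c.length →
    (List.range T).foldl
      (fun cands tN =>
        cands.filter (fun i => PySem.List.pyGetD (c ++ c) (i + (tN : Int)) 0 ==
          (PySem.List.min? (cands.map (fun i => PySem.List.pyGetD (c ++ c) (i + (tN : Int)) 0))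
            (fun x => x)).getD 0))
      ((List.range c.length).map (fun k => ((k : Nat) : Int)))
    = ((List.range c.length).filter (minPref c T)).map (fun k => ((k : Nat) : Int)) := by
  intro T
  induction T with
  | zero =>
      intro _
      simp only [List.range_zero, List.foldl_nil]
      congr 1
      symm
      rw [List.filter_eq_self]
      intro k _
      rw [minPref, decide_eq_true_eq]
      intro j _
      simp
  | succ T ih =>
      intro hT1
      have hT : T < c.length := by omega
      rw [List.range_succ, List.foldl_append, ih (by omega), List.foldl_cons, List.foldl_nil]
      -- the column of characters at position T, over the surviving candidates
      have hchar : ∀ k, k < c.length →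
          PySem.List.pyGetD (c ++ c) ((k : Int) + (T : Int)) 0 = (rotc c k).getD T 0 := by
        intro k hk
        have : ((k : Int) + (T : Int)) = ((k + T : Nat) : Int) := by push_cast; ring
        rw [this, PySem.List.pyGetD_natCast]
        exact d2_char c k T hk hT
      have hmapchar : (((List.range c.length).filter (minPref c T)).map (fun k => ((k : Nat) : Int))).map
            (fun i => PySem.List.pyGetD (c ++ c) (i + (T : Int)) 0)
          = ((List.range c.length).filter (minPref c T)).map (fun k => (rotc c k).getD T 0) := by
        rw [List.map_map]
        refine List.map_congr_left (fun k hk => ?_)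
        exact hchar k (List.mem_range.mp (List.mem_filter.mp hk).1)
      -- the minimum m' of that column
      obtain ⟨kw, hkw, hkwP⟩ := minPref_exists c hne T
      have hLne : (List.range c.length).filter (minPref c T) ≠ [] := by
        intro h
        have : kw ∈ (List.range c.length).filter (minPref c T) :=
          List.mem_filter.mpr ⟨List.mem_range.mpr hkw, hkwP⟩
        rw [h] at this
        exact List.not_mem_nil this
      obtain ⟨m', hm'⟩ : ∃ m', PySem.List.min?
          (((List.range c.length).filter (minPref c T)).map (fun k => (rotc c k).getD T 0))
          (fun x => x) = some m' := by
        cases h : PySem.List.min? (((List.range c.length).filter (minPref c T)).map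
            (fun k => (rotc c k).getD T 0)) (fun x => x) with
        | none =>
            rw [PySem.List.min?_eq_none_iff, List.map_eq_nil_iff] at h
            exact absurd h hLne
        | some m' => exact ⟨m', rfl⟩
      have hmem : ∃ k0, k0 < c.length ∧ minPref c T k0 = true ∧ (rotc c k0).getD T 0 = m' := by
        obtain ⟨k0, hk0mem, hk0⟩ := List.mem_map.mp (PySem.List.min?_mem hm')
        have := List.mem_filter.mp hk0mem
        exact ⟨k0, List.mem_range.mp this.1, this.2, hk0⟩
      have hmin : ∀ k, k < c.length → minPref c T k = true → m' ≤ (rotc c k).getD T 0 := by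
        intro k hk hkP
        exact min?_isMin' hm' _
          (List.mem_map_of_mem (List.mem_filter.mpr ⟨List.mem_range.mpr hk, hkP⟩))
      rw [hmapchar, hm', Option.getD_some, List.filter_map]
      congr 1
      rw [List.filter_filter]
      apply List.filter_congr
      intro k hkmem
      have hk : k < c.length := List.mem_range.mp hkmem
      simp only [Function.comp_apply]
      rw [hchar k hk, minPref_succ_iff c T hT m' hmem hmin k hk, Bool.and_comm]


lemma alt_least_rotation_eq (c : List Int) (hne : c ≠ []) :
    alt_least_rotation c =
      (PySem.List.min? ((List.range c.length).map (rotc c)) (fun x => x)).getD [] := by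
  have hn : c.length ≠ 0 := fun h => hne (List.length_eq_zero_iff.mp h)
  unfold alt_least_rotation
  simp only [PySem.List.pyRange_zero_natCast, List.foldl_map]
  rw [elim_fold c hne c.length le_rfl]
  -- the surviving candidate list is nonempty; take its head k0
  obtain ⟨kex, hkex, hkexP⟩ := minPref_exists c hne c.length
  obtain ⟨k0, t, hcons⟩ : ∃ k0 t, (List.range c.length).filter (minPref c c.length) = k0 :: t := by
    cases h : (List.range c.length).filter (minPref c c.length) with
    | nil =>
        have : kex ∈ (List.range c.length).filter (minPref c c.length) :=
          List.mem_filter.mpr ⟨List.mem_range.mpr hkex, hkexP⟩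
        rw [h] at this
        exact absurd this (List.not_mem_nil)
    | cons k0 t => exact ⟨k0, t, rfl⟩
  have hk0mem : k0 ∈ (List.range c.length).filter (minPref c c.length) := by
    rw [hcons]; exact List.mem_cons_self
  have hk0 : k0 < c.length := List.mem_range.mp (List.mem_filter.mp hk0mem).1
  have hk0P : minPref c c.length k0 = true := (List.mem_filter.mp hk0mem).2
  rw [hcons, List.map_cons, PySem.List.pyGetD_zero_cons, PySem.List.slice_natCast_add,
    rot_window c k0 hk0]
  -- the minimum rotation exists and equals rotc c k0
  obtain ⟨r, hr⟩ : ∃ r, PySem.List.min? ((List.range c.length).map (rotc c))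
      (fun x => x) = some r := by
    cases h : PySem.List.min? ((List.range c.length).map (rotc c)) (fun x => x) with
    | none =>
        rw [PySem.List.min?_eq_none_iff] at h
        simp only [List.map_eq_nil_iff, List.range_eq_nil] at h
        exact absurd h hn
    | some r => exact ⟨r, rfl⟩
  rw [hr, Option.getD_some]
  obtain ⟨j0, hj0mem, hj0⟩ := List.mem_map.mp (PySem.List.min?_mem hr)
  have hj0lt : j0 < c.length := List.mem_range.mp hj0mem
  have h1 : rotc c k0 ≤ r := by
    rw [← hj0]
    have hk0P' : ∀ j, j < c.length →
        (rotc c k0).take c.length ≤ (rotc c j).take c.length := by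
      rw [minPref, decide_eq_true_eq] at hk0P
      exact hk0P
    have := hk0P' j0 hj0lt
    rwa [List.take_of_length_le (le_of_eq (length_rotc c k0 (le_of_lt hk0))),
      List.take_of_length_le (le_of_eq (length_rotc c j0 (le_of_lt hj0lt)))] at this
  have h2 : r ≤ rotc c k0 :=
    min?_isMin' hr _ (List.mem_map_of_mem (List.mem_range.mpr hk0))
  exact le_antisymm h1 h2


-- ---------- phase 2: the backward dedup scan matches the representative characterization ----------

-- the windows A's backward scan appends, in order (seen-set tracked as a list of keys)
def dedupWins (w : Int → List Int) (g : Int → Bool) : List Int → List (List Int) → List (List Int)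
  | [], _ => []
  | i :: t, seen =>
      if (!seen.contains (w i)) && g i then w i :: dedupWins w g t (w i :: seen)
      else dedupWins w g t seen

-- pair each window with its running number
def enumFrom (c : Int) : List (List Int) → List (List Int × Int)
  | [] => []
  | x :: t => (x, c) :: enumFrom (c + 1) t

lemma length_enumFrom (c : Int) (L : List (List Int)) : (enumFrom c L).length = L.length := by
  induction L generalizing c with
  | nil => rfl
  | cons x t ih => simp [enumFrom, ih]

lemma sos_if_not_in_eq (lst : List (List Int × Int)) (v : List Int) :
    sos_if_not_in lst v = !((lst.map Prod.fst).contains v) := by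
  induction lst with
  | nil => rfl
  | cons p rest ih =>
      by_cases h : p.1 = v
      · simp [sos_if_not_in, h]
      · have hb : (p.1 == v) = false := by simp [h]
        simp [sos_if_not_in, hb, ih, Ne.symm h]

lemma dedupWins_congr (w : Int → List Int) (g : Int → Bool) :
    ∀ (l : List Int) (s1 s2 : List (List Int)),
      (∀ v, s1.contains v = s2.contains v) → dedupWins w g l s1 = dedupWins w g l s2 := by
  intro l
  induction l with
  | nil => intro _ _ _; rfl
  | cons i t ih =>
      intro s1 s2 h
      simp only [dedupWins, h (w i)]
      by_cases hc : ((!s2.contains (w i)) && g i) = true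
      · rw [if_pos hc, if_pos hc, ih (w i :: s1) (w i :: s2) (fun v => by
          rw [List.contains_cons, List.contains_cons, h v])]
      · rw [if_neg hc, if_neg hc, ih s1 s2 h]

lemma foldA (w : Int → List Int) (g : Int → Bool) :
    ∀ (l : List Int) (lst : List (List Int × Int)),
      l.foldl (fun (st : List (List Int × Int) × Int) i =>
          if sos_if_not_in st.1 (w i) && g i then (st.1 ++ [(w i, st.2)], st.2 + 1) else st)
        (lst, (lst.length : Int))
      = (lst ++ enumFrom (lst.length : Int) (dedupWins w g l (lst.map Prod.fst)),
         ((lst.length : Int) + ((dedupWins w g l (lst.map Prod.fst)).length : Int))) := by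
  intro l
  induction l with
  | nil => intro lst; simp [dedupWins, enumFrom]
  | cons i t ih =>
      intro lst
      rw [List.foldl_cons]
      by_cases hc : ((!(lst.map Prod.fst).contains (w i)) && g i) = true
      · rw [if_pos (by rw [sos_if_not_in_eq]; exact hc)]
        have h1 : ((lst.length : Int) + 1) = (((lst ++ [(w i, (lst.length : Int))]).length : Int)) := by
          simp
        rw [h1, ih (lst ++ [(w i, (lst.length : Int))])]
        have h2 : dedupWins w g t ((lst ++ [(w i, (lst.length : Int))]).map Prod.fst)
            = dedupWins w g t (w i :: lst.map Prod.fst) := by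
          apply dedupWins_congr
          intro v
          rw [List.contains_cons, List.map_append, List.contains_append]
          have hb : (v == w i) = decide (v = w i) := by
            rw [Bool.eq_iff_iff]
            simp
          simp [Bool.or_comm, hb]
        have h3 : dedupWins w g (i :: t) (lst.map Prod.fst)
            = w i :: dedupWins w g t (w i :: lst.map Prod.fst) := by
          simp only [dedupWins]
          rw [if_pos hc]
        rw [h2, h3, enumFrom]
        refine Prod.ext_iff.mpr ⟨?_, ?_⟩
        · dsimp only
          rw [List.append_assoc, List.cons_append, List.nil_append, ← h1]
        · dsimp only
          rw [← h1]
          simp only [List.length_cons]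
          push_cast
          ring
      · rw [if_neg (by rw [sos_if_not_in_eq]; exact hc)]
        rw [ih lst]
        have h3 : dedupWins w g (i :: t) (lst.map Prod.fst)
            = dedupWins w g t (lst.map Prod.fst) := by
          simp only [dedupWins]
          rw [if_neg hc]
        rw [h3]

-- over a strictly descending index list, the dedup scan keeps exactly the representatives
-- (indices with no later equal window), in order
lemma dedupWins_desc (w : Int → List Int) (g : Int → Bool) :
    ∀ (l : List Int), l.Pairwise (fun a b => b < a) →
      (∀ i ∈ l, ∀ j ∈ l, w i = w j → g i = g j) →
      ∀ (seen : List (List Int)),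
      dedupWins w g l seen
        = (l.filter (fun i => g i && !(seen.contains (w i)) &&
             l.all (fun j => decide (j ≤ i) || !(w j == w i)))).map w := by
  intro l
  induction l with
  | nil => intro _ _ _; rfl
  | cons i0 t ih =>
      intro hsort hg seen
      have hlt : ∀ j ∈ t, j < i0 := fun j hj => (List.pairwise_cons.mp hsort).1 j hj
      have hsort' : t.Pairwise (fun a b => b < a) := (List.pairwise_cons.mp hsort).2
      have hg' : ∀ i ∈ t, ∀ j ∈ t, w i = w j → g i = g j := fun i hi j hj =>
        hg i (List.mem_cons_of_mem _ hi) j (List.mem_cons_of_mem _ hj)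
      have hheadall : (i0 :: t).all (fun j => decide (j ≤ i0) || !(w j == w i0)) = true := by
        rw [List.all_eq_true]
        intro j hj
        rcases List.mem_cons.mp hj with h | h
        · subst h; simp
        · simp [le_of_lt (hlt j h)]
      by_cases hc : ((!seen.contains (w i0)) && g i0) = true
      · have h3 : dedupWins w g (i0 :: t) seen = w i0 :: dedupWins w g t (w i0 :: seen) := by
          simp only [dedupWins]
          rw [if_pos hc]
        rw [h3, ih hsort' hg' (w i0 :: seen), List.filter_cons]
        have hcond : (g i0 && !seen.contains (w i0) &&
            (i0 :: t).all (fun j => decide (j ≤ i0) || !(w j == w i0))) = true := by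
          rw [hheadall, Bool.and_true, Bool.and_comm]
          exact hc
        rw [hcond]
        simp only [if_true, List.map_cons]
        congr 1
        congr 1
        apply List.filter_congr
        intro i hi
        have hii0 : i < i0 := hlt i hi
        by_cases hwi : w i = w i0
        · have h1 : (w i0 :: seen).contains (w i) = true := by
            simp [hwi]
          have h2 : (i0 :: t).all (fun j => decide (j ≤ i) || !(w j == w i)) = false := by
            rw [List.all_eq_false]
            have hle : ¬ (i0 ≤ i) := by omega
            exact ⟨i0, List.mem_cons_self, by simp [hwi, hle]⟩
          rw [h1, h2]
          simp
        · have hbeq : (w i == w i0) = false := beq_eq_false_iff_ne.mpr hwi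
          have h1 : (w i0 :: seen).contains (w i) = seen.contains (w i) := by
            rw [List.contains_cons, hbeq, Bool.false_or]
          have hextra : (decide (i0 ≤ i) || !(w i0 == w i)) = true := by
            have hbeq' : (w i0 == w i) = false :=
              beq_eq_false_iff_ne.mpr (fun h => hwi h.symm)
            rw [hbeq']
            simp
          rw [h1, List.all_cons, hextra, Bool.true_and]
      · have h3 : dedupWins w g (i0 :: t) seen = dedupWins w g t seen := by
          simp only [dedupWins]
          rw [if_neg hc]
        rw [h3, ih hsort' hg' seen, List.filter_cons]
        have hcfalse : ((!seen.contains (w i0)) && g i0) = false := Bool.eq_false_iff.mpr hc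
        have hcond : (g i0 && !seen.contains (w i0) &&
            (i0 :: t).all (fun j => decide (j ≤ i0) || !(w j == w i0))) = false := by
          rw [hheadall, Bool.and_true, Bool.and_comm]
          exact hcfalse
        rw [hcond]
        simp only [Bool.false_eq_true, if_false]
        congr 1
        apply List.filter_congr
        intro i hi
        have hii0 : i < i0 := hlt i hi
        by_cases hwi : w i = w i0
        · have hgi : g i = g i0 := hg i (List.mem_cons_of_mem _ hi) i0 List.mem_cons_self hwi
          rcases Bool.and_eq_false_iff.mp hcfalse with h | h
          · have hcont : seen.contains (w i) = true := by
              cases hx : seen.contains (w i0) with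
              | false => rw [hx] at h; simp at h
              | true => rw [hwi]; exact hx
            rw [hcont]
            simp
          · have hgf : g i = false := by rw [hgi]; exact h
            rw [hgf]
            simp
        · have hbeq' : (w i0 == w i) = false :=
            beq_eq_false_iff_ne.mpr (fun h => hwi h.symm)
          have hextra : (decide (i0 ≤ i) || !(w i0 == w i)) = true := by
            rw [hbeq']
            simp
          rw [List.all_cons, hextra, Bool.true_and]


lemma sos_find_enum_not_mem (s : List Int) :
    ∀ (L : List (List Int)) (c : Int), s ∉ L → sos_find_sequence (enumFrom c L) s = none := by
  intro L
  induction L with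
  | nil => intro _ _; rfl
  | cons x t ih =>
      intro c hmem
      have hx : s ≠ x := fun h => hmem (h ▸ List.mem_cons_self)
      simp only [enumFrom, sos_find_sequence]
      rw [if_neg (by simpa using hx)]
      exact ih (c + 1) (fun h => hmem (List.mem_cons_of_mem _ h))

lemma sos_find_enum_first (s : List Int) :
    ∀ (L1 : List (List Int)) (c : Int) (L2 : List (List Int)), s ∉ L1 →
      sos_find_sequence (enumFrom c (L1 ++ s :: L2)) s = some (c + (L1.length : Int)) := by
  intro L1
  induction L1 with
  | nil =>
      intro c L2 _
      simp only [List.nil_append, enumFrom, sos_find_sequence]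
      rw [if_pos (by simp)]
      simp
  | cons x t ih =>
      intro c L2 hmem
      have hx : s ≠ x := fun h => hmem (h ▸ List.mem_cons_self)
      simp only [List.cons_append, enumFrom, sos_find_sequence]
      rw [if_neg (by simpa using hx)]
      rw [ih (c + 1) L2 (fun h => hmem (List.mem_cons_of_mem _ h))]
      congr 1
      simp only [List.length_cons]
      push_cast
      ring

lemma alt_first_match_none (dn s : List Int) (size : Int) :
    ∀ (reps : List Int), alt_first_match dn s size reps = none →
      ∀ r ∈ reps, PySem.List.slice dn (some r) (some (r + size + 1)) ≠ s := by
  intro reps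
  induction reps with
  | nil => intro _ r hr; exact absurd hr List.not_mem_nil
  | cons x t ih =>
      intro h r hr
      rw [alt_first_match] at h
      by_cases hx : (PySem.List.slice dn (some x) (some (x + size + 1)) == s) = true
      · rw [if_pos hx] at h; exact absurd h (by simp)
      · rw [if_neg hx] at h
        rcases List.mem_cons.mp hr with h1 | h1
        · subst h1
          exact fun he => hx (by simpa using he)
        · exact ih h r h1

lemma alt_first_match_some (dn s : List Int) (size : Int) :
    ∀ (reps : List Int) (r : Int), alt_first_match dn s size reps = some r →
      ∃ pre post, reps = pre ++ r :: post ∧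
        (∀ x ∈ pre, PySem.List.slice dn (some x) (some (x + size + 1)) ≠ s) ∧
        PySem.List.slice dn (some r) (some (r + size + 1)) = s := by
  intro reps
  induction reps with
  | nil => intro r h; exact absurd h (by simp [alt_first_match])
  | cons x t ih =>
      intro r h
      rw [alt_first_match] at h
      by_cases hx : (PySem.List.slice dn (some x) (some (x + size + 1)) == s) = true
      · rw [if_pos hx] at h
        have hxr : x = r := by simpa using h
        subst hxr
        exact ⟨[], t, by simp, by simp, by simpa using hx⟩
      · rw [if_neg hx] at h
        obtain ⟨pre, post, h1, h2, h3⟩ := ih r h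
        refine ⟨x :: pre, post, by rw [h1, List.cons_append], ?_, h3⟩
        intro y hy
        rcases List.mem_cons.mp hy with hy | hy
        · subst hy
          exact fun he => hx (by simpa using he)
        · exact h2 y hy

-- restrict 'every j in [0,n)' to the tail range (i, n) when the body holds trivially below i
lemma all_tail_eq (n i : Int) (hi : i ∈ PySem.List.pyRange 0 n 1) (q : Int → Bool) :
    (PySem.List.pyRange 0 n 1).all (fun j => decide (j ≤ i) || q j)
      = (PySem.List.pyRange (i + 1) n 1).all q := by
  obtain ⟨h0, hn⟩ := (PySem.List.mem_pyRange_one).mp hi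
  rw [PySem.List.pyRange_one_append 0 (i + 1) n (by omega) (by omega), List.all_append]
  have h1 : (PySem.List.pyRange 0 (i + 1) 1).all (fun j => decide (j ≤ i) || q j) = true := by
    rw [List.all_eq_true]
    intro j hj
    have := (PySem.List.mem_pyRange_one).mp hj
    simp [show j ≤ i by omega]
  rw [h1, Bool.true_and]
  rw [Bool.eq_iff_iff, List.all_eq_true, List.all_eq_true]
  constructor
  · intro h j hj
    have hjb := (PySem.List.mem_pyRange_one).mp hj
    have := h j hj
    rcases Bool.or_eq_true_iff.mp this with h2 | h2
    · exact absurd (of_decide_eq_true h2) (by omega)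
    · exact h2
  · intro h j hj
    rw [h j hj]
    simp

-- the first character of the window at i is dn[i]
lemma head_window (dn : List Int) (n : Nat)
    (i : Int) (h0 : 0 ≤ i) (hi : i < (n : Int)) :
    PySem.List.pyGetD dn i 0 = (PySem.List.slice dn (some i) (some (i + (n : Int) + 1))).getD 0 0 := by
  obtain ⟨iN, rfl⟩ : ∃ iN : Nat, i = (iN : Int) := ⟨i.toNat, by omega⟩
  have hiN : iN < n := by omega
  have hsl : (iN : Int) + (n : Int) + 1 = (iN : Int) + ((n + 1 : Nat) : Int) := by push_cast; ring
  rw [hsl, PySem.List.slice_natCast_add, PySem.List.pyGetD_natCast]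
  rw [List.getD_eq_getElem?_getD, List.getD_eq_getElem?_getD, List.getElem?_take, if_pos (by omega),
    List.getElem?_drop]
  simp


-- the backward dedup-and-number scan and the representative characterization agree
lemma phase2 (dn s : List Int) (n : Nat) :
    (sos_find_sequence ((PySem.List.pyRange ((n : Int) - 1) (-1) (-1)).foldl (fun (st : List (List Int × Int) × Int) i => if sos_if_not_in st.1 (PySem.List.slice dn (some i) (some (i + (n : Int) + 1))) && (PySem.List.pyGetD dn i 0 == 1) then (st.1 ++ [(PySem.List.slice dn (some i) (some (i + (n : Int) + 1)), st.2)], st.2 + 1) else st) ([], 0)).1 s, (((PySem.List.pyRange ((n : Int) - 1) (-1) (-1)).foldl (fun (st : List (List Int × Int) × Int) i => if sos_if_not_in st.1 (PySem.List.slice dn (some i) (some (i + (n : Int) + 1))) && (PySem.List.pyGetD dn i 0 == 1) then (st.1 ++ [(PySem.List.slice dn (some i) (some (i + (n : Int) + 1)), st.2)], st.2 + 1) else st) ([], 0)).1.length : Int))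
    = ((match alt_first_match dn s (n : Int) ((PySem.List.pyRange 0 (n : Int) 1).filter (fun i => (PySem.List.pyGetD dn i 0 == 1) && (PySem.List.pyRange (i + 1) (n : Int) 1).all (fun j => !(PySem.List.slice dn (some j) (some (j + (n : Int) + 1)) == PySem.List.slice dn (some i) (some (i + (n : Int) + 1)))))) with
        | none => none
        | some r => some ((((PySem.List.pyRange 0 (n : Int) 1).filter (fun i => (PySem.List.pyGetD dn i 0 == 1) && (PySem.List.pyRange (i + 1) (n : Int) 1).all (fun j => !(PySem.List.slice dn (some j) (some (j + (n : Int) + 1)) == PySem.List.slice dn (some i) (some (i + (n : Int) + 1)))))).countP (fun i => r < i) : Int))),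
       (((PySem.List.pyRange 0 (n : Int) 1).filter (fun i => (PySem.List.pyGetD dn i 0 == 1) && (PySem.List.pyRange (i + 1) (n : Int) 1).all (fun j => !(PySem.List.slice dn (some j) (some (j + (n : Int) + 1)) == PySem.List.slice dn (some i) (some (i + (n : Int) + 1)))))).length : Int)) := by
  have hrev : PySem.List.pyRange ((n : Int) - 1) (-1) (-1)
      = (PySem.List.pyRange 0 (n : Int) 1).reverse := by
    rw [PySem.List.pyRange_neg_one_eq_reverse]
    norm_num
  have hfold := foldA (fun i => PySem.List.slice dn (some i) (some (i + (n : Int) + 1)))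
    (fun i => PySem.List.pyGetD dn i 0 == 1) ((PySem.List.pyRange 0 (n : Int) 1).reverse) []
  simp only [List.length_nil, Nat.cast_zero, List.map_nil, List.nil_append] at hfold
  rw [hrev, hfold]
  -- the dedup scan keeps exactly the representatives, in descending order
  have hpw : ((PySem.List.pyRange 0 (n : Int) 1).reverse).Pairwise (fun a b => b < a) := by
    rw [List.pairwise_reverse]
    exact PySem.List.pairwise_lt_pyRange_one 0 (n : Int)
  have hgdet : ∀ i ∈ (PySem.List.pyRange 0 (n : Int) 1).reverse,
      ∀ j ∈ (PySem.List.pyRange 0 (n : Int) 1).reverse,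
      PySem.List.slice dn (some i) (some (i + (n : Int) + 1)) =
        PySem.List.slice dn (some j) (some (j + (n : Int) + 1)) →
      (PySem.List.pyGetD dn i 0 == 1) = (PySem.List.pyGetD dn j 0 == 1) := by
    intro i hi j hj hwij
    rw [List.mem_reverse] at hi hj
    obtain ⟨hi0, hi1⟩ := (PySem.List.mem_pyRange_one).mp hi
    obtain ⟨hj0, hj1⟩ := (PySem.List.mem_pyRange_one).mp hj
    rw [head_window dn n i hi0 hi1, head_window dn n j hj0 hj1, hwij]
  have hD := dedupWins_desc (fun i => PySem.List.slice dn (some i) (some (i + (n : Int) + 1)))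
    (fun i => PySem.List.pyGetD dn i 0 == 1) ((PySem.List.pyRange 0 (n : Int) 1).reverse)
    hpw hgdet []
  rw [List.filter_reverse] at hD
  have hpredeq : (PySem.List.pyRange 0 (n : Int) 1).filter
      (fun i => (PySem.List.pyGetD dn i 0 == 1) && !(([] : List (List Int)).contains
          (PySem.List.slice dn (some i) (some (i + (n : Int) + 1)))) &&
        ((PySem.List.pyRange 0 (n : Int) 1).reverse).all
          (fun j => decide (j ≤ i) || !(PySem.List.slice dn (some j) (some (j + (n : Int) + 1)) ==
              PySem.List.slice dn (some i) (some (i + (n : Int) + 1)))))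
      = (PySem.List.pyRange 0 (n : Int) 1).filter
        (fun i => (PySem.List.pyGetD dn i 0 == 1) &&
          (PySem.List.pyRange (i + 1) (n : Int) 1).all
            (fun j => !(PySem.List.slice dn (some j) (some (j + (n : Int) + 1)) ==
                        PySem.List.slice dn (some i) (some (i + (n : Int) + 1))))) := by
    apply List.filter_congr
    intro i hi
    rw [List.all_reverse, all_tail_eq (n : Int) i hi]
    simp only [List.contains_nil, Bool.not_false, Bool.and_true]
  rw [hD, hpredeq]
  set reps := (PySem.List.pyRange 0 (n : Int) 1).filter
    (fun i => (PySem.List.pyGetD dn i 0 == 1) &&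
      (PySem.List.pyRange (i + 1) (n : Int) 1).all
        (fun j => !(PySem.List.slice dn (some j) (some (j + (n : Int) + 1)) ==
                    PySem.List.slice dn (some i) (some (i + (n : Int) + 1))))) with hreps
  have hrepspw : reps.Pairwise (· < ·) := (PySem.List.pairwise_lt_pyRange_one 0 (n : Int)).filter _
  have hrepsall : ∀ r ∈ reps, ∀ x ∈ reps, r < x →
      PySem.List.slice dn (some x) (some (x + (n : Int) + 1)) ≠
      PySem.List.slice dn (some r) (some (r + (n : Int) + 1)) := by
    intro r hr x hx hrx
    have hxasc := List.mem_of_mem_filter hx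
    obtain ⟨hx0, hx1⟩ := (PySem.List.mem_pyRange_one).mp hxasc
    have hrpred := (List.mem_filter.mp hr).2
    have hall := (Bool.and_eq_true_iff.mp hrpred).2
    rw [List.all_eq_true] at hall
    have := hall x ((PySem.List.mem_pyRange_one).mpr ⟨by omega, hx1⟩)
    intro he
    rw [he] at this
    simp at this
  refine Prod.ext_iff.mpr ⟨?_, ?_⟩
  · dsimp only
    cases h : alt_first_match dn s (n : Int) reps with
    | none =>
        have hno := alt_first_match_none dn s (n : Int) reps h
        apply sos_find_enum_not_mem
        intro hmem
        rw [List.mem_map] at hmem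
        obtain ⟨r, hr, hwr⟩ := hmem
        rw [List.mem_reverse] at hr
        exact hno r hr hwr
    | some r =>
        obtain ⟨pre, post, hsplit, hprem, hwr⟩ := alt_first_match_some dn s (n : Int) reps r h
        have hdecomp : ((reps.reverse).map (fun i => PySem.List.slice dn (some i)
            (some (i + (n : Int) + 1))))
            = ((post.reverse).map (fun i => PySem.List.slice dn (some i)
                (some (i + (n : Int) + 1)))) ++ s ::
              ((pre.reverse).map (fun i => PySem.List.slice dn (some i)
                (some (i + (n : Int) + 1)))) := by
          rw [hsplit]
          simp only [List.reverse_append, List.reverse_cons, List.map_append, List.map_cons,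
            List.map_reverse, hwr]
          rw [List.append_assoc, List.cons_append]
          simp
        rw [hdecomp]
        -- pairwise order facts from the decomposition
        rw [hsplit] at hrepspw
        have hpost : ∀ x ∈ post, r < x := by
          intro x hx
          have := (List.pairwise_append.mp hrepspw).2.1
          exact (List.pairwise_cons.mp this).1 x hx
        have hprelt : ∀ x ∈ pre, x < r := by
          intro x hx
          exact (List.pairwise_append.mp hrepspw).2.2 x hx r List.mem_cons_self
        have hnotin : s ∉ ((post.reverse).map (fun i => PySem.List.slice dn (some i)
            (some (i + (n : Int) + 1)))) := by
          intro hmem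
          rw [List.mem_map] at hmem
          obtain ⟨x, hx, hwx⟩ := hmem
          rw [List.mem_reverse] at hx
          have hxreps : x ∈ reps := by
            rw [hsplit]
            exact List.mem_append_right _ (List.mem_cons_of_mem _ hx)
          have hrreps : r ∈ reps := by
            rw [hsplit]
            exact List.mem_append_right _ List.mem_cons_self
          exact hrepsall r hrreps x hxreps (hpost x hx) (by rw [hwx, hwr])
        rw [sos_find_enum_first s _ 0 _ hnotin]
        congr 1
        rw [hsplit, List.countP_append, List.countP_cons]
        have hcpre : pre.countP (fun i => decide (r < i)) = 0 := by
          rw [List.countP_eq_zero]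
          intro x hx
          simp [not_lt.mpr (le_of_lt (hprelt x hx))]
        have hcpost : post.countP (fun i => decide (r < i)) = post.length := by
          rw [List.countP_eq_length]
          intro x hx
          simp [hpost x hx]
        simp [hcpre, hcpost]
  · dsimp only
    rw [length_enumFrom, List.length_map, List.length_reverse]

-- ===== VERDICT (by name: the statement is the Claim_ definition above) =====
theorem shift_order_for_1_spec : Claim_equal_shift_order_for_1 := by
  intro s _ hpre
  have hs : 2 ≤ s.length := hpre
  unfold Spec_shift_order_for_1 shift_order_for_1 shift_order_for_1_alt
  simp only []
  obtain ⟨n, hn⟩ : ∃ n : Nat, s.length - 1 = n := ⟨_, rfl⟩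
  have hcast : (s.length : Int) - 1 = (n : Int) := by omega
  have hclen : (s.take n).length = n := by simp; omega
  have hcne : s.take n ≠ [] := by
    apply List.ne_nil_of_length_pos
    omega
  have hA := necklace_eq s hs
  rw [hcast, hn] at hA
  have hB := alt_least_rotation_eq (s.take n) hcne
  rw [hclen] at hB
  have hrotc : rotc (s.take n) = fun k => (s.take n).drop k ++ (s.take n).take k := rfl
  rw [hrotc] at hB
  rw [hcast, hA, PySem.List.slice_to_natCast, hB]
  set neck := (PySem.List.min? ((List.range n).map
      (fun k => (s.take n).drop k ++ (s.take n).take k)) (fun x => x)).getD [] with hneck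
  exact phase2 (neck ++ neck) s n
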